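-- pv_equiv track=rewrite | github.com/eZanmoto/blog_content | src/code/tricky_strings.py | is_likely_in_str
-- ===== SOURCE A (Python) =====
-- def is_likely_in_str(line, index):
--     cur_str_char = None
--     in_str = lambda: cur_str_char is not None
--     escaped = False
--
--     for i, char in enumerate(line[:index]):
--         if in_str():
--             if char == '\\':
--                 escaped = not escaped
--             else:
--                 escaped = False
--         else:
--             escaped = False
--
--         if char in ['\'', '"', '`']:
--             if in_str():
--                 if char == cur_str_char and not escaped:
--                     cur_str_char = None
--             else:
--                 cur_str_char = char
--
--     return in_str()
-- ===== SOURCE B (Python) =====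
-- def is_likely_in_str(line, index):
--     rest = line[:index]
--     while rest:
--         c, rest = rest[0], rest[1:]
--         if c in '\'"`':
--             j = rest.find(c)
--             if j == -1:
--                 return True       # opening quote never closed
--             rest = rest[j + 1:]   # skip to just past the closing quote
--     return False
-- ===== Notes on version B (the rewrite author's own statement) =====
-- stated objective: simpler
-- what changed: Replaces A's per-character state machine (cur_str_char plus an escaped flag that is dead code, being reset before every quote test) with a skip-to-closing-quote loop: on an opening quote, find the next same quote and jump past it, returning True if none exists.
import Mathlib
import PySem

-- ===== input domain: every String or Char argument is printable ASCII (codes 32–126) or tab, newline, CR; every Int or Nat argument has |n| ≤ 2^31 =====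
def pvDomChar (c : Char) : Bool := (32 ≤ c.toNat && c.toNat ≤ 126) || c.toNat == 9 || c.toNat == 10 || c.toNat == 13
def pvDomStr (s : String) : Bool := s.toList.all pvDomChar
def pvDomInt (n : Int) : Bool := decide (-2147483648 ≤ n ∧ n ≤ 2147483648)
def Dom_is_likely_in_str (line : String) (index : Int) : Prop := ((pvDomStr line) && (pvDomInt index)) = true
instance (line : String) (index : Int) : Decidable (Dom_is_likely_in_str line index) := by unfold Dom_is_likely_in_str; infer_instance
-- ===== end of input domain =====

-- B replaces A's per-character state machine (cur_str_char plus an `escaped` flag that is in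
-- fact dead code, being reset before every quote test) by a skip-to-closing-quote loop;
-- objective: simpler.

-- ===== PORT A =====
-- one step of A's for-loop body: state = (cur_str_char, escaped)
def pvStepA (st : Option Char × Bool) (char : Char) : Option Char × Bool :=
  let escaped := if st.1.isSome then (if char = '\\' then !st.2 else false) else false
  let cur :=
    if char ∈ (['\'', '"', '`'] : List Char) then
      if st.1.isSome then
        (if st.1 = some char ∧ escaped = false then none else st.1)
      else some char
    else st.1
  (cur, escaped)

def is_likely_in_str (line : String) (index : Int) : Bool :=
  -- for i, char in enumerate(line[:index]): … ; return in_str()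
  ((PySem.List.enumerate (PySem.List.slice line.toList none (some index)) 0).foldl
      (fun st p => pvStepA st p.2) (none, false)).1.isSome

-- ===== PORT B =====
-- rest.find(c) returns -1 when absent; ported as index? with none for -1 (exact: the index is
-- only used when the character is found)
def pvBLoop : List Char → Bool
  | [] => false
  | c :: rest =>
    if c ∈ "'\"`".toList then
      match PySem.List.index? rest c with
      | none => true                          -- opening quote never closed
      | some j => pvBLoop (rest.drop (j + 1)) -- skip to just past the closing quote
    else pvBLoop rest
termination_by l => l.length
decreasing_by
  all_goals simp [List.length_drop]

def is_likely_in_str_alt (line : String) (index : Int) : Bool :=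
  pvBLoop (PySem.List.slice line.toList none (some index))

-- ===== PRECONDITION & SPEC =====
def Spec_is_likely_in_str (line : String) (index : Int) (out : Bool) : Prop := out = is_likely_in_str_alt line index
instance (line : String) (index : Int) (out : Bool) : Decidable (Spec_is_likely_in_str line index out) := by unfold Spec_is_likely_in_str; infer_instance

-- ===== CLAIM (what is proved, stated in full; the proofs are below) =====
def Claim_equal_is_likely_in_str : Prop := ∀ (line : String) (index : Int), Dom_is_likely_in_str line index → Spec_is_likely_in_str line index (is_likely_in_str line index)

-- ===== LEMMAS AND PROOFS =====

-- folding over enumerate while ignoring the index = folding over the list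
theorem pv_foldl_enumerate {σ : Type} (g : σ → Char → σ) :
    ∀ (l : List Char) (s : Int) (init : σ),
      (PySem.List.enumerate l s).foldl (fun st p => g st p.2) init = l.foldl g init := by
  intro l
  induction l with
  | nil => intro s init; simp [PySem.List.enumerate_nil]
  | cons c t ih => intro s init; simp [PySem.List.enumerate_cons, ih]

-- inside a string opened with quote c, A scans exactly until the next c
-- (the escaped flag is always false when the current char is a quote)
theorem pv_in_str (c : Char) (hc : c = '\'' ∨ c = '"' ∨ c = '`') :
    ∀ (rest : List Char) (esc : Bool),
      ((rest.foldl pvStepA (some c, esc)).1.isSome =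
        match PySem.List.index? rest c with
        | none => true
        | some j => (((rest.drop (j + 1)).foldl pvStepA ((none : Option Char), false)).1.isSome)) := by
  intro rest
  induction rest with
  | nil =>
    intro esc
    rw [PySem.List.index?_eq_idxOf?]
    simp
  | cons h t ih =>
    intro esc
    by_cases hhc : h = c
    · subst hhc
      have hb : ¬ (h = '\\') := by rcases hc with rfl | rfl | rfl <;> decide
      have hqmem : h ∈ (['\'', '"', '`'] : List Char) := by
        rcases hc with rfl | rfl | rfl <;> decide
      have hstep : pvStepA (some h, esc) h = (none, false) := by
        simp [pvStepA, hb, hqmem]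
      rw [List.foldl_cons, hstep, PySem.List.index?_cons_self]
      simp
    · have hstep : pvStepA (some c, esc) h =
          (some c, if h = '\\' then !esc else false) := by
        by_cases hq : h ∈ (['\'', '"', '`'] : List Char)
        · simp [pvStepA, hq, Ne.symm hhc]
        · simp [pvStepA, hq]
      rw [List.foldl_cons, hstep, ih, PySem.List.index?_cons_of_ne t hhc]
      cases hidx : PySem.List.index? t c with
      | none => simp
      | some j => simp

-- outside a string, A's fold agrees with B's skip loop
theorem pv_out_str : ∀ (s : List Char),
    ((s.foldl pvStepA ((none : Option Char), false)).1.isSome = pvBLoop s)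
  | [] => by simp [pvBLoop]
  | c :: rest => by
    by_cases hq : c = '\'' ∨ c = '"' ∨ c = '`'
    · have hqmem : c ∈ (['\'', '"', '`'] : List Char) := by
        rcases hq with rfl | rfl | rfl <;> decide
      have hqmem' : c ∈ "'\"`".toList := by
        rcases hq with rfl | rfl | rfl <;> decide
      have hstep : pvStepA ((none : Option Char), false) c = (some c, false) := by
        simp [pvStepA, hqmem]
      rw [List.foldl_cons, hstep, pv_in_str c hq rest false, pvBLoop, if_pos hqmem']
      cases hidx : PySem.List.index? rest c with
      | none => simp
      | some j => simp only [pv_out_str (rest.drop (j + 1))]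
    · have hqmem : c ∉ (['\'', '"', '`'] : List Char) := by simpa using hq
      have hqmem' : c ∉ "'\"`".toList := by
        rw [(by rfl : "'\"`".toList = ['\'', '"', '`'])]; exact hqmem
      have hstep : pvStepA ((none : Option Char), false) c = (none, false) := by
        simp [pvStepA, hqmem]
      rw [List.foldl_cons, hstep, pvBLoop, if_neg hqmem']
      exact pv_out_str rest
termination_by s => s.length
decreasing_by
  all_goals simp [List.length_drop]

-- ===== VERDICT (by name: the statement is the Claim_ definition above) =====
theorem is_likely_in_str_spec : Claim_equal_is_likely_in_str := by
  intro line index _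
  unfold Spec_is_likely_in_str is_likely_in_str is_likely_in_str_alt
  rw [pv_foldl_enumerate pvStepA _ 0, pv_out_str]
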